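-- pv_equiv track=rewrite | github.com/ericmerle3789/Collatz-Junction-Theorem | scripts/research/r24_multiplier_coset.py | enum_nondecreasing_B
-- ===== SOURCE A (Python) =====
-- def enum_nondecreasing_B(k, max_B, limit=500000):
--     """Generate all nondecreasing B sequences with B_0=0, B_j <= max_B."""
--     count = [0]
--
--     def gen(pos, min_val, current):
--         if count[0] >= limit:
--             return
--         if pos == k:
--             count[0] += 1
--             yield tuple(current)
--             return
--         for v in range(min_val, max_B + 1):
--             current.append(v)
--             yield from gen(pos + 1, v, current)
--             current.pop()
--
--     # B_0 = 0 always (first position in A-vector is 0)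
--     return gen(1, 0, [0])
-- ===== SOURCE B (Python) =====
-- def enum_nondecreasing_B(k, max_B, limit=500000):
--     """Generate all nondecreasing B sequences with B_0=0, B_j <= max_B."""
--     def gen():
--         if limit <= 0:
--             return
--         level = [(0,)]
--         for _ in range(k - 1):
--             if not level:
--                 break
--             stream = (p + (v,) for p in level for v in range(p[-1], max_B + 1))
--             level = []
--             for t in stream:
--                 level.append(t)
--                 if len(level) == limit:
--                     break
--         for t in level:
--             yield t
--     return gen()
-- ===== Notes on version B (the rewrite author's own statement) =====
-- stated objective: alternative
-- what changed: Replaces the depth-first recursive generator with shared mutable state (append/pop backtracking, a count cell, nested yield-from) by an iterative breadth-wise construction: the list of valid prefixes is extended one position at a time, collecting at most `limit` extended prefixes per round from a lazy comprehension, then the final level is yielded.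
-- outside the precondition, e.g. on enum_nondecreasing_B(0, -1, 5): A returns [], B returns [(0,)]
import Mathlib
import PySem

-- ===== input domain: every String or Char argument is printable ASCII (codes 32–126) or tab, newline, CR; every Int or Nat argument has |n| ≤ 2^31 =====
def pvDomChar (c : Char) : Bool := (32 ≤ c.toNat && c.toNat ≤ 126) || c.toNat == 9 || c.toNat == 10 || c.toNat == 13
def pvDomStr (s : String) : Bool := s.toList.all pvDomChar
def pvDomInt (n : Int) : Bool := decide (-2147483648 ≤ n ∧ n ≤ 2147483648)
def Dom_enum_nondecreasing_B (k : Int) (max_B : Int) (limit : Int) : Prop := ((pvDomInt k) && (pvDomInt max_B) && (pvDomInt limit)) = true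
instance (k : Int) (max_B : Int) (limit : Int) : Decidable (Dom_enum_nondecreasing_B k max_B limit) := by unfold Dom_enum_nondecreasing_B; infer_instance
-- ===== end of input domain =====

-- B replaces A's recursive backtracking generator by iterative breadth-wise prefix extension with
-- truncation to `limit` after each round (alternative decomposition, similar cost).
-- Both Pythons return lazy generators; equivalence is about the sequence of yielded tuples.

-- ===== PORT A =====
-- fuel = (k - pos).toNat makes A's recursion structural; on Pre_ (k ≥ 1 at the initial call
-- gen(1, 0, [0])) it reaches 0 exactly when pos == k, so the port is exact there.
def genA (limit max_B : Int) : Nat → Int → List Int → Int → Int × List (List Int)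
  | fuel, mv, cur, count =>
    if limit ≤ count then (count, [])
    else
      match fuel with
      | 0 => (count + 1, [cur])
      | f + 1 =>
        (PySem.List.pyRange mv (max_B + 1) 1).foldl
          (fun st v =>
            let r := genA limit max_B f v (cur ++ [v]) st.1
            (r.1, st.2 ++ r.2))
          (count, [])

def enum_nondecreasing_B (k : Int) (max_B : Int) (limit : Int) : List (List Int) :=
  (genA limit max_B (k - 1).toNat 0 [0] 0).2

-- ===== PORT B =====
-- p[-1]: p is always nonempty (starts as (0,)), so pyGetD is exact there.
-- B's append-until-limit loop over the lazy comprehension `stream` collects exactly the first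
-- `limit` elements of the concatenation; here limit > 0, so `.take limit.toNat` is exact.
-- The `for _ in range(k-1): if not level: break` loop is the recursion below on (k-1).toNat,
-- returning as soon as level is empty.
def levelsB (max_B limit : Int) : Nat → List (List Int) → List (List Int)
  | 0, level => level
  | j + 1, level =>
    if level = [] then level
    else
      levelsB max_B limit j
        ((level.flatMap (fun p =>
          (PySem.List.pyRange (PySem.List.pyGetD p (-1) 0) (max_B + 1) 1).map (fun v => p ++ [v]))).take
          limit.toNat)

def enum_nondecreasing_B_alt (k : Int) (max_B : Int) (limit : Int) : List (List Int) :=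
  if limit ≤ 0 then []
  else levelsB max_B limit (k - 1).toNat [[(0 : Int)]]

-- ===== PRECONDITION & SPEC =====
-- Pre_ excludes (a) k ≤ 0 with limit > 0: there A raises RecursionError when max_B ≥ 0, and for
-- max_B < 0 its empty result is an accident of the overshooting recursion (B yields (0,) there);
-- and (b) k ≥ 1000 with max_B ≥ 0 and limit > 0, where A's recursion of depth k raises
-- RecursionError (CPython's default recursion limit is 1000).
def Pre_enum_nondecreasing_B (k : Int) (max_B : Int) (limit : Int) : Prop :=
  (1 ≤ k ∨ limit ≤ 0) ∧ (k < 1000 ∨ max_B < 0 ∨ limit ≤ 0)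
instance (k : Int) (max_B : Int) (limit : Int) : Decidable (Pre_enum_nondecreasing_B k max_B limit) := by unfold Pre_enum_nondecreasing_B; infer_instance
def pvWitness_enum_nondecreasing_B : Int × Int × Int := (3, 2, 10)

def Spec_enum_nondecreasing_B (k : Int) (max_B : Int) (limit : Int) (out : List (List Int)) : Prop := out = enum_nondecreasing_B_alt k max_B limit
instance (k : Int) (max_B : Int) (limit : Int) (out : List (List Int)) : Decidable (Spec_enum_nondecreasing_B k max_B limit out) := by unfold Spec_enum_nondecreasing_B; infer_instance

-- ===== CLAIM (what is proved, stated in full; the proofs are below) =====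
def Claim_equal_enum_nondecreasing_B : Prop := ∀ (k : Int) (max_B : Int) (limit : Int), Dom_enum_nondecreasing_B k max_B limit → Pre_enum_nondecreasing_B k max_B limit → Spec_enum_nondecreasing_B k max_B limit (enum_nondecreasing_B k max_B limit)

-- ===== LEMMAS AND PROOFS =====

-- The full (uncut) lexicographic enumeration both programs truncate.
def fullE (max_B : Int) : Nat → Int → List Int → List (List Int)
  | 0, _, cur => [cur]
  | f + 1, mv, cur =>
    (PySem.List.pyRange mv (max_B + 1) 1).flatMap (fun v => fullE max_B f v (cur ++ [v]))

theorem fullE_ne_nil (max_B : Int) (f : Nat) (mv : Int) (cur : List Int) (h : mv ≤ max_B) :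
    fullE max_B f mv cur ≠ [] := by
  induction f generalizing mv cur with
  | zero => simp [fullE]
  | succ f ih =>
    rw [fullE, PySem.List.pyRange_one_cons (by omega)]
    simp only [List.flatMap_cons]
    intro hc
    exact ih mv (cur ++ [mv]) h (by rcases List.append_eq_nil_iff.mp hc with ⟨h1, _⟩; exact h1)

-- A's fold over range, assuming the closed form at the smaller fuel.
theorem genA_foldl (limit max_B : Int) (f : Nat) (cur : List Int)
    (H : ∀ (v c : Int), genA limit max_B f v (cur ++ [v]) c
        = (c + ((fullE max_B f v (cur ++ [v])).take (limit - c).toNat).length,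
           (fullE max_B f v (cur ++ [v])).take (limit - c).toNat)) :
    ∀ (vs : List Int) (count : Int) (acc : List (List Int)),
      vs.foldl (fun st v =>
          let r := genA limit max_B f v (cur ++ [v]) st.1
          (r.1, st.2 ++ r.2)) (count, acc)
      = (count + ((vs.flatMap (fun v => fullE max_B f v (cur ++ [v]))).take (limit - count).toNat).length,
         acc ++ (vs.flatMap (fun v => fullE max_B f v (cur ++ [v]))).take (limit - count).toNat) := by
  intro vs
  induction vs with
  | nil => intro count acc; simp
  | cons v vs ih =>
    intro count acc
    rw [List.foldl_cons]
    rw [show (let r := genA limit max_B f v (cur ++ [v]) ((count, acc) : Int × List (List Int)).1;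
        (r.1, ((count, acc) : Int × List (List Int)).2 ++ r.2))
      = ((count + (((fullE max_B f v (cur ++ [v])).take (limit - count).toNat).length : Int),
         acc ++ (fullE max_B f v (cur ++ [v])).take (limit - count).toNat) : Int × List (List Int)) from by simp [H]]
    rw [ih]
    simp only [List.flatMap_cons]
    rw [List.take_append]
    have hlen : ((fullE max_B f v (cur ++ [v])).take (limit - count).toNat).length
        = min (limit - count).toNat (fullE max_B f v (cur ++ [v])).length := List.length_take ..
    have harith : (limit - (count + ↑((fullE max_B f v (cur ++ [v])).take (limit - count).toNat).length)).toNat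
        = (limit - count).toNat - (fullE max_B f v (cur ++ [v])).length := by
      rw [hlen]; omega
    rw [harith]
    simp [List.append_assoc]
    omega

-- A's closed form: genA returns the first (limit - count) elements of fullE, threading the count.
theorem genA_eq (limit max_B : Int) (f : Nat) :
    ∀ (mv : Int) (cur : List Int) (count : Int),
      genA limit max_B f mv cur count
      = (count + ((fullE max_B f mv cur).take (limit - count).toNat).length,
         (fullE max_B f mv cur).take (limit - count).toNat) := by
  induction f with
  | zero =>
    intro mv cur count
    rw [genA]
    by_cases h : limit ≤ count
    · have : (limit - count).toNat = 0 := by omega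
      simp [h, this]
    · rw [if_neg h]
      have ht : (limit - count).toNat = (limit - count - 1).toNat + 1 := by omega
      rw [show fullE max_B 0 mv cur = [cur] from rfl, ht]
      simp
  | succ f ih =>
    intro mv cur count
    rw [genA]
    by_cases h : limit ≤ count
    · have : (limit - count).toNat = 0 := by
        omega
      simp [h, this]
    · simp only [h, if_false]
      rw [genA_foldl limit max_B f cur (fun v c => ih v (cur ++ [v]) c)]
      rfl

-- truncating before flatMap does not change the first n results when every block is nonempty
theorem length_le_length_flatMap {α β : Type} (g : α → List β) (X : List α)
    (h : ∀ q ∈ X, g q ≠ []) : X.length ≤ (X.flatMap g).length := by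
  induction X with
  | nil => simp
  | cons x xs ih =>
    simp only [List.flatMap_cons, List.length_append, List.length_cons]
    have h1 : 0 < (g x).length := List.length_pos_iff.mpr (h x (by simp))
    have h2 := ih (fun q hq => h q (by simp [hq]))
    omega

theorem take_flatMap_take {α β : Type} (g : α → List β) (X : List α) (n : Nat)
    (h : ∀ q ∈ X, g q ≠ []) :
    ((X.take n).flatMap g).take n = (X.flatMap g).take n := by
  by_cases hn : X.length ≤ n
  · rw [List.take_of_length_le hn]
  · have hXlen : (X.take n).length = n := by rw [List.length_take]; omega
    have hge : n ≤ ((X.take n).flatMap g).length := by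
      have := length_le_length_flatMap g (X.take n) (fun q hq => h q (List.mem_of_mem_take hq))
      omega
    conv_rhs => rw [← List.take_append_drop n X]
    rw [List.flatMap_append, List.take_append]
    have hz : n - ((X.take n).flatMap g).length = 0 := by omega
    rw [hz]
    simp

-- the per-position extension B performs (p[-1] is the lower bound for the next value)
def extB (max_B : Int) (p : List Int) : List (List Int) :=
  (PySem.List.pyRange (PySem.List.pyGetD p (-1) 0) (max_B + 1) 1).map (fun v => p ++ [v])

theorem extB_full (max_B : Int) (f : Nat) (p : List Int) :
    (extB max_B p).flatMap (fun q => fullE max_B f (PySem.List.pyGetD q (-1) 0) q)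
      = fullE max_B (f + 1) (PySem.List.pyGetD p (-1) 0) p := by
  simp [extB, fullE, List.flatMap_map,
    PySem.List.pyGetD_neg_one_append_singleton]

-- B's level iteration computes the first n elements of the full enumeration
theorem iterB (max_B : Int) (n : Nat) :
    ∀ (j : Nat) (L : List (List Int)), L.length ≤ n →
      (fun lvl => ((lvl.flatMap (extB max_B)).take n))^[j] L
        = (L.flatMap (fun p => fullE max_B j (PySem.List.pyGetD p (-1) 0) p)).take n := by
  intro j
  induction j with
  | zero =>
    intro L hL
    simp [fullE, List.take_of_length_le hL]
  | succ j ih =>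
    intro L hL
    rw [Function.iterate_succ_apply]
    have hlen : (((L.flatMap (extB max_B)).take n) : List (List Int)).length ≤ n := by
      simp
    rw [ih _ hlen]
    have hne : ∀ q ∈ L.flatMap (extB max_B),
        fullE max_B j (PySem.List.pyGetD q (-1) 0) q ≠ [] := by
      intro q hq
      rcases List.mem_flatMap.mp hq with ⟨p, _, hq2⟩
      rcases List.mem_map.mp hq2 with ⟨v, hv, rfl⟩
      have hvle : v < max_B + 1 := (PySem.List.mem_pyRange_one.mp hv).2
      rw [PySem.List.pyGetD_neg_one_append_singleton]
      exact fullE_ne_nil max_B j v (p ++ [v]) (by omega)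
    rw [take_flatMap_take _ _ _ hne, List.flatMap_assoc]
    simp only [extB_full]

theorem levelsB_eq_iterate (max_B limit : Int) :
    ∀ (j : Nat) (L : List (List Int)),
      levelsB max_B limit j L
        = (fun lvl => ((lvl.flatMap (extB max_B)).take limit.toNat))^[j] L := by
  intro j
  induction j with
  | zero => intro L; rfl
  | succ j ih =>
    intro L
    rw [levelsB]
    by_cases hL : L = []
    · rw [if_pos hL, hL]
      exact (Function.iterate_fixed (by simp) (j + 1)).symm
    · rw [if_neg hL, Function.iterate_succ_apply, ih]
      rfl

-- ===== VERDICT (by name: the statement is the Claim_ definition above) =====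
theorem enum_nondecreasing_B_spec : Claim_equal_enum_nondecreasing_B := by
  intro k max_B limit _ _
  unfold Spec_enum_nondecreasing_B enum_nondecreasing_B enum_nondecreasing_B_alt
  by_cases hl : limit ≤ 0
  · rw [if_pos hl, genA.eq_def]
    simp [hl]
  · rw [if_neg hl]
    rw [levelsB_eq_iterate max_B limit ((k - 1).toNat) [[(0 : Int)]]]
    rw [iterB max_B limit.toNat ((k - 1).toNat) [[(0 : Int)]] (by simp; omega)]
    rw [genA_eq limit max_B ((k - 1).toNat) 0 [0] 0]
    have hz : PySem.List.pyGetD [(0 : Int)] (-1) 0 = 0 := by decide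
    simp [hz]
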